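-- pv_equiv track=rewrite | github.com/foo123/Beeld | compilers/cssmin.py | wrap_css_lines
-- ===== SOURCE A (Python) =====
-- def wrap_css_lines(css, line_length):
--     """Wrap the lines of the given CSS to an approximate length."""
--
--     lines = []
--     line_start = 0
--     for i, ch in enumerate(css):
--         # It's safe to break after `}` characters.
--         if '}' == ch  and (i - line_start >= line_length):
--             lines.append(css[line_start:i + 1])
--             line_start = i + 1
--
--     if line_start < len(css): lines.append(css[line_start:])
--
--     return "\n".join( lines )
-- ===== SOURCE B (Python) =====
-- def wrap_css_lines(css, line_length):
--     """Wrap the lines of the given CSS to an approximate length."""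
--     parts = css.split('}')
--     lines = []
--     buf = ''
--     for seg in parts[:-1]:
--         buf += seg
--         if len(buf) >= line_length:
--             lines.append(buf + '}')
--             buf = ''
--         else:
--             buf += '}'
--     buf += parts[-1]
--     if buf:
--         lines.append(buf)
--     return "\n".join(lines)
-- ===== Notes on version B (the rewrite author's own statement) =====
-- stated objective: faster
-- what changed: Replaces the indexed per-character scan with line_start slice arithmetic by one split on '}' followed by greedily packing the pre-split segments into a running buffer flushed at line_length.
import Mathlib
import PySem

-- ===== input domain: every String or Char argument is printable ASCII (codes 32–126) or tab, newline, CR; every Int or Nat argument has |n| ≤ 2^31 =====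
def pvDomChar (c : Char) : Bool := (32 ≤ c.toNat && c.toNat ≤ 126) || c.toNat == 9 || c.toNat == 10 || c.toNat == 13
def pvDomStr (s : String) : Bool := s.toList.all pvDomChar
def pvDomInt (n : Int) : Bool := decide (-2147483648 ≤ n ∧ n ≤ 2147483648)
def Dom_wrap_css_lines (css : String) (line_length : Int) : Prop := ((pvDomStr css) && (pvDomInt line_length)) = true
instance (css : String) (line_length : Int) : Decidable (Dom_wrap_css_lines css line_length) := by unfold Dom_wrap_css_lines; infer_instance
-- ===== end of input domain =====

-- B replaces A's indexed character scan with line_start slice arithmetic by a single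
-- split on '}' plus a greedy running buffer (an alternative decomposition, same O(n)).

-- ===== PORT A =====
-- literal port of A: enumerate the characters, break after '}' when i - line_start >= line_length,
-- slicing the original string; join with newlines.
def wrap_css_lines (css : String) (line_length : Int) : String :=
  let l := css.toList
  let st := (PySem.List.enumerate l).foldl
    (fun (s : List (List Char) × Int) p =>
      if p.2 = '}' ∧ p.1 - s.2 ≥ line_length then
        (s.1 ++ [PySem.List.slice l (some s.2) (some (p.1 + 1))], p.1 + 1)
      else s) ([], 0)
  let lines := if st.2 < (l.length : Int) then st.1 ++ [PySem.List.slice l (some st.2) none] else st.1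
  String.mk (PySem.Chars.join ['\n'] lines)

-- ===== PORT B =====
-- literal port of B: split on '}' once, pack the segments greedily into a buffer
-- flushed (with the '}' re-attached) once it reaches line_length.
def wrap_css_lines_alt (css : String) (line_length : Int) : String :=
  let parts := PySem.Chars.splitOn css.toList ['}']
  let st := parts.dropLast.foldl
    (fun (s : List (List Char) × List Char) seg =>
      let buf := s.2 ++ seg
      if (buf.length : Int) ≥ line_length then (s.1 ++ [buf ++ ['}']], [])
      else (s.1, buf ++ ['}'])) ([], [])
  let buf := st.2 ++ (parts.getLast?.getD [])
  let lines := if buf = [] then st.1 else st.1 ++ [buf]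
  String.mk (PySem.Chars.join ['\n'] lines)

-- ===== PRECONDITION & SPEC =====
def Spec_wrap_css_lines (css : String) (line_length : Int) (out : String) : Prop := out = wrap_css_lines_alt css line_length
instance (css : String) (line_length : Int) (out : String) : Decidable (Spec_wrap_css_lines css line_length out) := by unfold Spec_wrap_css_lines; infer_instance

-- ===== CLAIM (what is proved, stated in full; the proofs are below) =====
def Claim_equal_wrap_css_lines : Prop := ∀ (css : String) (line_length : Int), Dom_wrap_css_lines css line_length → Spec_wrap_css_lines css line_length (wrap_css_lines css line_length)

-- ===== LEMMAS AND PROOFS =====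

-- Common specification: one recursive pass with an explicit pending buffer.
def wrapGo (L : Int) : List Char → List Char → List (List Char)
  | buf, [] => if buf = [] then [] else [buf]
  | buf, c :: rest =>
    if c = '}' then
      if (buf.length : Int) ≥ L then (buf ++ ['}']) :: wrapGo L [] rest
      else wrapGo L (buf ++ ['}']) rest
    else wrapGo L (buf ++ [c]) rest

-- A's loop (plus its tail append) computes wrapGo.
theorem wrapA_spec (L : Int) (l : List Char) :
    ∀ (rest pre buf : List Char) (lines : List (List Char)),
      l = pre ++ buf ++ rest →
      (let st := (PySem.List.enumerate rest ((pre.length : Int) + buf.length)).foldl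
          (fun (s : List (List Char) × Int) p =>
            if p.2 = '}' ∧ p.1 - s.2 ≥ L then
              (s.1 ++ [PySem.List.slice l (some s.2) (some (p.1 + 1))], p.1 + 1)
            else s) (lines, (pre.length : Int))
       if st.2 < (l.length : Int) then st.1 ++ [PySem.List.slice l (some st.2) none] else st.1)
      = lines ++ wrapGo L buf rest := by
  intro rest
  induction rest with
  | nil =>
    intro pre buf lines hl
    simp only [PySem.List.enumerate_nil, List.foldl_nil, wrapGo]
    rw [PySem.List.slice_from_natCast]
    subst hl
    simp only [List.append_nil, List.length_append]
    by_cases hb : buf = []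
    · simp [hb]
    · have hpos : 0 < buf.length := List.length_pos_iff.mpr hb
      rw [if_pos (by exact_mod_cast (by omega : pre.length < pre.length + buf.length)),
        List.drop_left, if_neg hb]
  | cons c rest ih =>
    intro pre buf lines hl
    rw [PySem.List.enumerate_cons, List.foldl_cons]
    by_cases hcond : c = '}' ∧ ((pre.length : Int) + buf.length) - (pre.length : Int) ≥ L
    · rw [if_pos hcond]
      obtain ⟨hc, hlen⟩ := hcond
      have hlen' : ((buf.length : Int)) ≥ L := by omega
      have hslice : PySem.List.slice l (some (pre.length : Int))
          (some (((pre.length : Int) + buf.length) + 1)) = buf ++ [c] := by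
        have harr : ((pre.length : Int) + buf.length) + 1
            = (((pre.length + buf.length + 1 : Nat)) : Int) := by push_cast; ring
        rw [harr, PySem.List.slice_natCast, hl, List.append_assoc, List.drop_left]
        rw [show pre.length + buf.length + 1 - pre.length = (buf ++ [c]).length by simp; omega]
        rw [show buf ++ c :: rest = (buf ++ [c]) ++ rest by simp, List.take_left]
      have harr2 : ((pre.length : Int) + buf.length) + 1
          = (((pre ++ buf ++ [c]).length : Nat) : Int) + (([] : List Char).length : Int) := by
        push_cast [List.length_append, List.length_cons, List.length_nil]; ring
      have hIH := ih (pre ++ buf ++ [c]) [] (lines ++ [buf ++ [c]])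
        (by simp [hl, List.append_assoc])
      rw [hslice, harr2]
      simp only [List.length_nil, Nat.cast_zero, add_zero] at hIH ⊢
      rw [hIH]
      simp [wrapGo, hc, hlen']
    · rw [if_neg hcond]
      have harr : ((pre.length : Int) + buf.length) + 1
          = (pre.length : Int) + ((buf ++ [c]).length : Int) := by
        push_cast [List.length_append, List.length_cons, List.length_nil]; ring
      have hIH := ih pre (buf ++ [c]) lines (by simp [hl])
      rw [harr]
      simp only [] at hIH ⊢
      rw [hIH]
      rcases eq_or_ne c '}' with h | h
      · subst h
        have hlen : ¬ ((buf.length : Int) ≥ L) := by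
          intro hx; exact hcond ⟨rfl, by omega⟩
        simp [wrapGo, hlen]
      · simp [wrapGo, h]

-- split on '}' written as direct recursion with a reversed-current accumulator.
def sp : List Char → List Char → List (List Char)
  | cur, [] => [cur.reverse]
  | cur, c :: rest => if c = '}' then cur.reverse :: sp [] rest else sp (c :: cur) rest

theorem sp_ne_nil (cur l : List Char) : sp cur l ≠ [] := by
  induction l generalizing cur with
  | nil => simp [sp]
  | cons c rest ih =>
    by_cases h : c = '}' <;> simp [sp, h, ih]

-- characterization of PySem's fueled splitOn.go for the one-character separator '}'.
theorem splitOn_go_spec (fuel : Nat) :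
    ∀ (l cur : List Char) (acc : List (List Char)), l.length < fuel →
      PySem.Chars.splitOn.go ['}'] fuel l cur acc = acc.reverse ++ sp cur l := by
  induction fuel with
  | zero => intro l cur acc h; omega
  | succ fuel ih =>
    intro l cur acc h
    match l with
    | [] => simp [PySem.Chars.splitOn.go, sp]
    | c :: rest =>
      by_cases hc : c = '}'
      · subst hc
        rw [show PySem.Chars.splitOn.go ['}'] (fuel + 1) ('}' :: rest) cur acc
              = PySem.Chars.splitOn.go ['}'] fuel (List.drop 1 ('}' :: rest)) [] (cur.reverse :: acc) by
            simp [PySem.Chars.splitOn.go, List.isPrefixOf]]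
        rw [List.drop_one, List.tail_cons, ih rest [] (cur.reverse :: acc) (by simpa using h)]
        simp [sp]
      · rw [show PySem.Chars.splitOn.go ['}'] (fuel + 1) (c :: rest) cur acc
              = PySem.Chars.splitOn.go ['}'] fuel rest (c :: cur) acc by
            simp [PySem.Chars.splitOn.go, List.isPrefixOf, Ne.symm hc]]
        rw [ih rest (c :: cur) acc (by simpa using h)]
        simp [sp, hc]

theorem splitOn_eq_sp (l : List Char) : PySem.Chars.splitOn l ['}'] = sp [] l := by
  rw [PySem.Chars.splitOn, splitOn_go_spec (l.length + 1) l [] [] (by omega)]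
  simp

theorem wrapGo_brace_ge (L : Int) (buf rest : List Char) (h : (buf.length : Int) ≥ L) :
    wrapGo L buf ('}' :: rest) = (buf ++ ['}']) :: wrapGo L [] rest := by
  simp [wrapGo, h]

theorem wrapGo_brace_lt (L : Int) (buf rest : List Char) (h : ¬ (buf.length : Int) ≥ L) :
    wrapGo L buf ('}' :: rest) = wrapGo L (buf ++ ['}']) rest := by
  simp [wrapGo, h]

theorem getLast?_cons_of_ne_nil (a : List Char) (xs : List (List Char)) (h : xs ≠ []) :
    (a :: xs).getLast? = xs.getLast? := by
  cases xs with
  | nil => exact absurd rfl h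
  | cons b ys => simp [List.getLast?_cons_cons]

-- B's fold over the split parts (plus its tail handling) computes wrapGo.
theorem wrapB_spec (L : Int) :
    ∀ (l cur buf : List Char) (lines : List (List Char)),
      (let st := (sp cur l).dropLast.foldl
          (fun (s : List (List Char) × List Char) seg =>
            let b := s.2 ++ seg
            if (b.length : Int) ≥ L then (s.1 ++ [b ++ ['}']], [])
            else (s.1, b ++ ['}'])) (lines, buf)
       let b := st.2 ++ ((sp cur l).getLast?.getD [])
       if b = [] then st.1 else st.1 ++ [b])
      = lines ++ wrapGo L (buf ++ cur.reverse) l := by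
  intro l
  induction l with
  | nil =>
    intro cur buf lines
    simp only [sp, List.dropLast_singleton, List.foldl_nil, List.getLast?_singleton,
      Option.getD_some, wrapGo]
    by_cases hb : buf ++ cur.reverse = []
    · simp [hb]
    · simp [hb]
  | cons c rest ih =>
    intro cur buf lines
    by_cases hc : c = '}'
    · subst hc
      have hsp : sp cur ('}' :: rest) = cur.reverse :: sp [] rest := by simp [sp]
      rw [hsp, List.dropLast_cons_of_ne_nil (sp_ne_nil [] rest), List.foldl_cons,
        getLast?_cons_of_ne_nil cur.reverse (sp [] rest) (sp_ne_nil [] rest)]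
      by_cases hlen : (((buf ++ cur.reverse).length : Int)) ≥ L
      · rw [if_pos hlen]
        have hIH := ih [] [] (lines ++ [buf ++ cur.reverse ++ ['}']])
        simp only [List.reverse_nil, List.append_nil] at hIH
        rw [hIH, wrapGo_brace_ge L _ rest hlen]
        simp
      · rw [if_neg hlen]
        have hIH := ih [] (buf ++ cur.reverse ++ ['}']) lines
        simp only [List.reverse_nil, List.append_nil] at hIH
        rw [hIH, wrapGo_brace_lt L _ rest hlen]
    · have hsp : sp cur (c :: rest) = sp (c :: cur) rest := by simp [sp, hc]
      rw [hsp, ih (c :: cur) buf lines]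
      simp [wrapGo, hc, List.append_assoc]

-- ===== VERDICT (by name: the statement is the Claim_ definition above) =====
theorem wrap_css_lines_spec : Claim_equal_wrap_css_lines := by
  intro css L _
  unfold Spec_wrap_css_lines wrap_css_lines wrap_css_lines_alt
  have hA := wrapA_spec L css.toList css.toList [] [] [] (by simp)
  simp only [List.length_nil, Nat.cast_zero, Int.add_zero, List.nil_append] at hA
  have hB := wrapB_spec L css.toList [] [] []
  simp only [List.reverse_nil, List.append_nil, List.nil_append] at hB
  rw [splitOn_eq_sp]
  simp only []
  rw [hA, hB]
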